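-- pv_equiv track=rewrite | github.com/pypi-data/pypi-mirror-377 | packages/pirateweather-translations/pirateweather_translations-1.3.0-py3-none-any.whl/pirateweather_translations/lang/da.py | join_with_shared_prefix
-- ===== SOURCE A (Python) =====
-- def join_with_shared_prefix(a, b, joiner):
--     m = a
--     i = 0
--
--     # Skip the prefix of b that is shared with a.
--     min_len = min(len(m), len(b))
--     while i < min_len and ord(m[i]) == ord(b[i]):
--         i += 1
--
--     # ...except whitespace! We need that whitespace!
--     # Move back until we hit a space or start of string
--     while i > 0 and (i > len(b) or (i <= len(b) and b[i - 1] != " ")):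
--         i -= 1
--
--     return a + joiner + b[i:]
-- ===== SOURCE B (Python) =====
-- def join_with_shared_prefix(a, b, joiner):
--     # Single forward pass: track the last space boundary while matching the
--     # common prefix, so no backward trimming scan is needed.
--     i = 0
--     last = 0
--     min_len = min(len(a), len(b))
--     while i < min_len and a[i] == b[i]:
--         i += 1
--         if b[i - 1] == " ":
--             last = i
--     return a + joiner + b[last:]
-- ===== Notes on version B (the rewrite author's own statement) =====
-- stated objective: simpler
-- what changed: Replaces A's two-phase forward-prefix-match-then-backward-trim (with its dead i>len(b) branch) by a single forward pass that records the last space boundary as it matches, then slices once.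
import Mathlib
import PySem

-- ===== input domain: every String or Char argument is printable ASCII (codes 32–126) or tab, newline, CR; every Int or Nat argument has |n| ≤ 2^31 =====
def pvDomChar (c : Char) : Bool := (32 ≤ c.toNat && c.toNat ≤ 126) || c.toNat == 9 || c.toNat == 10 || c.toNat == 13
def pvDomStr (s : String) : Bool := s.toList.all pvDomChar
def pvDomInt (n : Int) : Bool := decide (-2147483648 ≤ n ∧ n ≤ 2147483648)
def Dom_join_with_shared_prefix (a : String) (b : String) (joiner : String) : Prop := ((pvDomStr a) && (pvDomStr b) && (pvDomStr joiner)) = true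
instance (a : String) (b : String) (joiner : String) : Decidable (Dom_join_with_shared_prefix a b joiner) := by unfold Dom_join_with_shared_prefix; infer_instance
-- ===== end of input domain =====

-- B replaces A's forward-prefix-match + backward-trim with one forward pass that
-- records the last space boundary while matching (simpler decomposition, same cost).


-- ===== PORT A =====
-- A's first while loop: advance i while i < min_len and m[i] == b[i]
-- (ord(m[i]) == ord(b[i]) is exactly Char equality; the guard keeps both indexes
-- in range so getD with a dummy default is the exact Python indexing).
def pvAFwd (m b : List Char) (minLen i : Nat) : Nat :=
  if i < minLen ∧ m.getD i ' ' = b.getD i ' ' then pvAFwd m b minLen (i + 1) else i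
termination_by minLen - i

-- A's second while loop: move back until a space boundary or the start,
-- with the (inert when i ≤ len b) 'i > len(b)' disjunct kept verbatim.
def pvABack (b : List Char) (i : Nat) : Nat :=
  if 0 < i ∧ (b.length < i ∨ (i ≤ b.length ∧ b.getD (i - 1) ' ' ≠ ' ')) then pvABack b (i - 1) else i
termination_by i

def join_with_shared_prefix (a : String) (b : String) (joiner : String) : String :=
  let m := a.toList
  let bL := b.toList
  let minLen := min m.length bL.length
  let i := pvAFwd m bL minLen 0
  let i := pvABack bL i
  -- b[i:] for 0 ≤ i is exactly List.drop i
  String.ofList (a.toList ++ joiner.toList ++ bL.drop i)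

-- ===== PORT B =====
-- B's single loop: advance i while chars match, recording in `last` the index
-- just past the most recent matched space.
def pvBFwd (aL bL : List Char) (minLen i last : Nat) : Nat :=
  if aL.getD i ' ' = bL.getD i ' ' ∧ i < minLen then
    pvBFwd aL bL minLen (i + 1) (if bL.getD i ' ' = ' ' then i + 1 else last)
  else last
termination_by minLen - i

def join_with_shared_prefix_alt (a : String) (b : String) (joiner : String) : String :=
  let aL := a.toList
  let bL := b.toList
  let last := pvBFwd aL bL (min aL.length bL.length) 0 0
  String.ofList (a.toList ++ joiner.toList ++ bL.drop last)

-- ===== PRECONDITION & SPEC =====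
def Spec_join_with_shared_prefix (a : String) (b : String) (joiner : String) (out : String) : Prop := out = join_with_shared_prefix_alt a b joiner
instance (a : String) (b : String) (joiner : String) (out : String) : Decidable (Spec_join_with_shared_prefix a b joiner out) := by unfold Spec_join_with_shared_prefix; infer_instance

-- ===== CLAIM (what is proved, stated in full; the proofs are below) =====
def Claim_equal_join_with_shared_prefix : Prop := ∀ (a : String) (b : String) (joiner : String), Dom_join_with_shared_prefix a b joiner → Spec_join_with_shared_prefix a b joiner (join_with_shared_prefix a b joiner)

-- ===== LEMMAS AND PROOFS =====

-- pvABack at 0 stops immediately.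
theorem pvABack_zero (bL : List Char) : pvABack bL 0 = 0 := by
  rw [pvABack]; simp

-- Invariant: if `last` equals the backward-trim result at position i, then
-- B's loop from (i, last) returns the backward-trim result of A's final
-- forward-match position.
theorem pvBFwd_eq_back (aL bL : List Char) (minLen : Nat) (hlen : minLen ≤ bL.length) :
    ∀ n i last, minLen - i ≤ n → last = pvABack bL i →
      pvBFwd aL bL minLen i last = pvABack bL (pvAFwd aL bL minLen i) := by
  intro n
  induction n with
  | zero =>
    intro i last hfuel hlast
    have hi : ¬ i < minLen := by omega
    rw [pvBFwd, pvAFwd]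
    simp only [hi, and_false, false_and, if_false]
    exact hlast
  | succ n ih =>
    intro i last hfuel hlast
    rw [pvBFwd, pvAFwd]
    by_cases hg : i < minLen ∧ aL.getD i ' ' = bL.getD i ' '
    · have hg' : aL.getD i ' ' = bL.getD i ' ' ∧ i < minLen := ⟨hg.2, hg.1⟩
      simp only [hg]
      apply ih (i + 1) _ (by omega)
      -- the new `last` equals pvABack bL (i+1)
      have hle : i + 1 ≤ bL.length := by omega
      by_cases hs : bL.getD i ' ' = ' '
      · simp only [hs, if_true]
        rw [pvABack]
        have : ¬ (0 < i + 1 ∧ (bL.length < i + 1 ∨ (i + 1 ≤ bL.length ∧ bL.getD (i + 1 - 1) ' ' ≠ ' '))) := by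
          simp only [Nat.add_sub_cancel]
          intro h
          rcases h.2 with h2 | h2
          · omega
          · exact h2.2 hs
        simp only [this, if_false]
      · simp only [hs, if_false]
        rw [pvABack]
        have hcond : (0 < i + 1 ∧ (bL.length < i + 1 ∨ (i + 1 ≤ bL.length ∧ bL.getD (i + 1 - 1) ' ' ≠ ' '))) := by
          refine ⟨by omega, Or.inr ⟨hle, ?_⟩⟩
          simpa using hs
        rw [if_pos hcond]
        simpa using hlast
    · have hg' : ¬ (aL.getD i ' ' = bL.getD i ' ' ∧ i < minLen) := fun h => hg ⟨h.2, h.1⟩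
      simp only [hg, hg', if_false]
      exact hlast

-- ===== VERDICT (by name: the statement is the Claim_ definition above) =====
theorem join_with_shared_prefix_spec : Claim_equal_join_with_shared_prefix := by
  intro a b joiner _
  unfold Spec_join_with_shared_prefix join_with_shared_prefix join_with_shared_prefix_alt
  have h := pvBFwd_eq_back a.toList b.toList (min a.toList.length b.toList.length)
    (Nat.min_le_right _ _) (min a.toList.length b.toList.length) 0 0 (by omega)
    (pvABack_zero b.toList).symm
  simp only [h]
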